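-- pv_equiv track=rewrite | github.com/mafpub/best.football | scrapers/schools/ca/064347007028.py | _keyword_lines
-- ===== SOURCE A (Python) =====
-- PROGRAM_KEYWORDS = (
--     "athletics",
--     "athletic",
--     "sports",
--     "sport",
--     "football",
--     "basketball",
--     "baseball",
--     "softball",
--     "soccer",
--     "team",
--     "roster",
--     "schedule",
--     "cross country",
--     "cheer",
--     "cif",
-- )
--
-- def _dedupe(values: list[str]) -> list[str]:
--     seen: set[str] = set()
--     output: list[str] = []
--     for value in values:
--         item = value.strip()
--         if not item or item in seen:
--             continue
--         seen.add(item)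
--         output.append(item)
--     return output
--
-- def _keyword_lines(text: str) -> list[str]:
--     lines: list[str] = []
--     for raw_line in text.splitlines():
--         line = " ".join(raw_line.split()).strip()
--         lowered = line.lower()
--         if not line:
--             continue
--         if any(keyword in lowered for keyword in PROGRAM_KEYWORDS):
--             lines.append(line)
--     return _dedupe(lines)[:24]
-- ===== SOURCE B (Python) =====
-- PROGRAM_KEYWORDS = (
--     "athletics",
--     "athletic",
--     "sports",
--     "sport",
--     "football",
--     "basketball",
--     "baseball",
--     "softball",
--     "soccer",
--     "team",
--     "roster",
--     "schedule",
--     "cross country",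
--     "cheer",
--     "cif",
-- )
--
-- def _keyword_lines(text: str) -> list[str]:
--     seen: set[str] = set()
--     output: list[str] = []
--     for raw_line in text.splitlines():
--         line = " ".join(raw_line.split()).strip()
--         if not line:
--             continue
--         lowered = line.lower()
--         if not any(keyword in lowered for keyword in PROGRAM_KEYWORDS):
--             continue
--         if line in seen:
--             continue
--         seen.add(line)
--         output.append(line)
--         if len(output) == 24:
--             break
--     return output
-- ===== Notes on version B (the rewrite author's own statement) =====
-- stated objective: simpler
-- what changed: Fuses A's separate filter pass, dedupe pass and final [:24] slice into one pass that maintains a seen-set while scanning lines and breaks as soon as 24 lines are collected.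
import Mathlib
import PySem

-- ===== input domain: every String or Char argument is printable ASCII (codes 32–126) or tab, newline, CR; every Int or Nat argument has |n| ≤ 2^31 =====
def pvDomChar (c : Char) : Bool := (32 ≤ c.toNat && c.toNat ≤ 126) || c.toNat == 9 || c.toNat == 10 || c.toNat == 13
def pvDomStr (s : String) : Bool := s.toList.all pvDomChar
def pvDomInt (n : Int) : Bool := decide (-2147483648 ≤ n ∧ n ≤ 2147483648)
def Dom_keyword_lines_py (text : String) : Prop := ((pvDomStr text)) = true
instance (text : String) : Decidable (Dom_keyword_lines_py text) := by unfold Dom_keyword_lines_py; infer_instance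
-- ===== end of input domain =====

-- B fuses A's filter pass, separate dedupe pass and final [:24] slice into one scan that stops at 24 lines; return values proved equal.

def pvKeywords : List String :=
  ["athletics", "athletic", "sports", "sport", "football", "basketball", "baseball",
   "softball", "soccer", "team", "roster", "schedule", "cross country", "cheer", "cif"]

-- ===== PORT A =====
-- _dedupe's loop: item = value.strip(); skip if empty or seen; else record
def pvDedupeGo (values : List String) (seen : PySem.Set String) (output : List String) : List String :=
  match values with
  | [] => output
  | value :: rest =>
    let item := PySem.Str.strip value
    if item = "" ∨ PySem.Set.contains seen item then pvDedupeGo rest seen output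
    else pvDedupeGo rest (PySem.Set.add seen item) (output ++ [item])

def keyword_lines_py (text : String) : List String :=
  let lines := (PySem.Str.splitlines text).foldl (fun lines raw_line =>
    let line := PySem.Str.strip (PySem.Str.join " " (PySem.Str.split₀ raw_line))
    let lowered := PySem.Str.lower line
    if line = "" then lines
    else if pvKeywords.any (fun keyword => PySem.Str.isIn keyword lowered) then lines ++ [line]
    else lines) []
  PySem.List.slice (pvDedupeGo lines PySem.Set.empty []) none (some 24)

-- ===== PORT B =====
def pvAltGo (rows : List String) (seen : PySem.Set String) (output : List String) : List String :=
  match rows with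
  | [] => output
  | raw_line :: rest =>
    let line := PySem.Str.strip (PySem.Str.join " " (PySem.Str.split₀ raw_line))
    if line = "" then pvAltGo rest seen output
    else if ¬ (pvKeywords.any fun keyword => PySem.Str.isIn keyword (PySem.Str.lower line)) then
      pvAltGo rest seen output
    else if PySem.Set.contains seen line then pvAltGo rest seen output
    else
      let output' := output ++ [line]
      if output'.length = 24 then output' else pvAltGo rest (PySem.Set.add seen line) output'

def keyword_lines_py_alt (text : String) : List String :=
  pvAltGo (PySem.Str.splitlines text) PySem.Set.empty []

-- ===== PRECONDITION & SPEC =====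
def Spec_keyword_lines_py (text : String) (out : List String) : Prop := out = keyword_lines_py_alt text
instance (text : String) (out : List String) : Decidable (Spec_keyword_lines_py text out) := by unfold Spec_keyword_lines_py; infer_instance

-- ===== CLAIM (what is proved, stated in full; the proofs are below) =====
def Claim_equal_keyword_lines_py : Prop := ∀ (text : String), Dom_keyword_lines_py text → Spec_keyword_lines_py text (keyword_lines_py text)

-- ===== LEMMAS AND PROOFS =====

-- the normalized line, the keyword test, and the filter predicate of A's first pass
def pvNorm (raw : String) : String := PySem.Str.strip (PySem.Str.join " " (PySem.Str.split₀ raw))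
def pvKw (line : String) : Bool := pvKeywords.any fun keyword => PySem.Str.isIn keyword (PySem.Str.lower line)
def pvGood (raw : String) : Bool := !(pvNorm raw == "") && pvKw (pvNorm raw)

-- first-occurrence dedupe of a list, relative to an already-seen set
def pvDed (seen : PySem.Set String) : List String → List String
  | [] => []
  | v :: vs => if PySem.Set.contains seen v then pvDed seen vs
               else v :: pvDed (PySem.Set.add seen v) vs

theorem pv_dropWhile_idem (p : Char → Bool) (l : List Char) :
    List.dropWhile p (List.dropWhile p l) = List.dropWhile p l := by
  rcases h : List.dropWhile p l with _ | ⟨c, cs⟩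
  · simp
  · have hc : p c = false := by
      have := List.head_dropWhile_not p (l := l) (by rw [h]; simp)
      simpa [h] using this
    rw [List.dropWhile_cons_of_neg (by simp [hc])]

theorem pv_dropWhile_rev (p : Char → Bool) (l : List Char) (hl : List.dropWhile p l = l) :
    List.dropWhile p (List.dropWhile p l.reverse).reverse = (List.dropWhile p l.reverse).reverse := by
  obtain ⟨t, ht⟩ := List.dropWhile_suffix (l := l.reverse) p
  have hl2 : l = (List.dropWhile p l.reverse).reverse ++ t.reverse := by
    have := congrArg List.reverse ht
    simpa using this.symm
  rcases hm : (List.dropWhile p l.reverse).reverse with _ | ⟨c, cs⟩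
  · simp
  · rw [hm] at hl2
    have hlnon : 0 < l.length := by rw [hl2]; simp
    have hc : ¬ p l[0] = true := (List.dropWhile_eq_self_iff.mp hl) hlnon
    have hce : l[0] = c := by
      rw [List.getElem_of_eq hl2]
      simp
    rw [hce] at hc
    rw [List.dropWhile_cons_of_neg (by simp at hc; simp [hc])]

theorem pv_chars_strip_idem (l : List Char) :
    PySem.Chars.strip (PySem.Chars.strip l) = PySem.Chars.strip l := by
  simp only [PySem.Chars.strip, PySem.Chars.lstrip, PySem.Chars.rstrip]
  rw [pv_dropWhile_rev _ _ (pv_dropWhile_idem _ l), List.reverse_reverse, pv_dropWhile_idem]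

theorem pv_strip_idem (s : String) : PySem.Str.strip (PySem.Str.strip s) = PySem.Str.strip s := by
  simp [PySem.Str.strip, pv_chars_strip_idem]

-- A's dedupe loop, on a list of nonempty already-stripped values, is the relative first-occurrence dedupe
theorem pvDedupeGo_eq (vs : List String) (seen : PySem.Set String) (out : List String)
    (h : ∀ v ∈ vs, PySem.Str.strip v = v ∧ v ≠ "") :
    pvDedupeGo vs seen out = out ++ pvDed seen vs := by
  induction vs generalizing seen out with
  | nil => simp [pvDedupeGo, pvDed]
  | cons v vs ih =>
    obtain ⟨hs, hne⟩ := h v (by simp)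
    have h' : ∀ w ∈ vs, PySem.Str.strip w = w ∧ w ≠ "" := fun w hw => h w (by simp [hw])
    simp only [pvDedupeGo, pvDed, hs]
    by_cases hc : PySem.Set.contains seen v = true
    · rw [if_pos (Or.inr hc), if_pos hc, ih _ _ h']
    · have hm : v ∉ seen := by simpa using hc
      rw [if_neg (by simp [hne, hm]), if_neg hc, ih _ _ h']
      simp

-- B's loop appends the first (24 - |output|) not-yet-seen good lines
theorem pvAltGo_eq (rows : List String) (seen : PySem.Set String) (out : List String)
    (hlt : out.length < 24) :
    pvAltGo rows seen out
      = out ++ (pvDed seen ((rows.filter pvGood).map pvNorm)).take (24 - out.length) := by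
  induction rows generalizing seen out with
  | nil => simp [pvAltGo, pvDed]
  | cons raw rest ih =>
    simp only [pvAltGo, List.filter_cons]
    rw [show PySem.Str.strip (PySem.Str.join " " (PySem.Str.split₀ raw)) = pvNorm raw from rfl]
    rw [show (pvKeywords.any fun keyword => PySem.Str.isIn keyword (PySem.Str.lower (pvNorm raw))) = pvKw (pvNorm raw) from rfl]
    by_cases h0 : pvNorm raw = ""
    · have hg : pvGood raw = false := by simp [pvGood, h0]
      rw [if_pos h0, ih _ _ hlt, hg]
      simp
    · rw [if_neg h0]
      by_cases hk : pvKw (pvNorm raw) = true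
      · have hg : pvGood raw = true := by simp [pvGood, h0, hk]
        rw [if_neg (by simp [hk]), hg]
        simp only [if_true, List.map_cons, pvDed]
        by_cases hc : PySem.Set.contains seen (pvNorm raw) = true
        · rw [if_pos hc, if_pos hc, ih _ _ hlt]
        · rw [if_neg hc, if_neg hc]
          obtain ⟨k, hk24⟩ : ∃ k, 24 - out.length = k + 1 :=
            ⟨24 - out.length - 1, by omega⟩
          rw [hk24, List.take_succ_cons]
          by_cases hfull : (out ++ [pvNorm raw]).length = 24
          · rw [if_pos hfull]
            have hk0 : k = 0 := by simp at hfull; omega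
            subst hk0
            simp
          · rw [if_neg hfull]
            have hlen : (out ++ [pvNorm raw]).length < 24 := by
              simp at hfull ⊢
              omega
            rw [ih _ _ hlen]
            have h24 : 24 - (out ++ [pvNorm raw]).length = k := by simp; omega
            rw [h24]
            simp
      · have hg : pvGood raw = false := by simp [pvGood, hk]
        rw [if_pos (by simp [hk]), ih _ _ hlt, hg]
        simp

-- ===== VERDICT (by name: the statement is the Claim_ definition above) =====
theorem keyword_lines_py_spec : Claim_equal_keyword_lines_py := by
  intro text _
  show keyword_lines_py text = keyword_lines_py_alt text
  simp only [keyword_lines_py, keyword_lines_py_alt]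
  have hstep := PySem.List.foldl_congr_mem
      (l := PySem.Str.splitlines text) (init := ([] : List String))
      (f := fun lines raw_line =>
        if PySem.Str.strip (PySem.Str.join " " (PySem.Str.split₀ raw_line)) = "" then lines
        else
          if (pvKeywords.any fun keyword =>
                PySem.Str.isIn keyword
                  (PySem.Str.lower (PySem.Str.strip (PySem.Str.join " " (PySem.Str.split₀ raw_line))))) = true then
            lines ++ [PySem.Str.strip (PySem.Str.join " " (PySem.Str.split₀ raw_line))]
          else lines)
      (g := fun lines raw => if pvGood raw = true then lines ++ [pvNorm raw] else lines)
      (by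
        intro acc x _
        simp only [pvGood, pvNorm, pvKw]
        by_cases h0 : PySem.Str.strip (PySem.Str.join " " (PySem.Str.split₀ x)) = ""
        · simp [h0]
        · by_cases hk : (pvKeywords.any fun keyword =>
              PySem.Str.isIn keyword (PySem.Str.lower (PySem.Str.strip (PySem.Str.join " " (PySem.Str.split₀ x))))) = true
          · simp [h0]
          · simp [h0])
  rw [hstep, PySem.List.foldl_append_if]
  have hprop : ∀ v ∈ (((PySem.Str.splitlines text).filter (fun raw => pvGood raw)).map pvNorm),
      PySem.Str.strip v = v ∧ v ≠ "" := by
    intro v hv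
    simp only [List.mem_map, List.mem_filter] at hv
    obtain ⟨raw, ⟨_, hgood⟩, rfl⟩ := hv
    refine ⟨pv_strip_idem _, ?_⟩
    simp only [pvGood, Bool.and_eq_true, Bool.not_eq_true', beq_eq_false_iff_ne] at hgood
    exact hgood.1
  rw [List.nil_append, pvDedupeGo_eq _ _ _ hprop, pvAltGo_eq _ _ _ (by simp)]
  rw [PySem.List.slice_to]
  · simp
  · norm_num
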